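-- pv_equiv track=rewrite | github.com/Ashishkumar448/GFG-Problem-of-the-day | 2025-07-July-GFG-POTD/July 13 - Maximum sum of elements not part of LIS/Solution.py | nonLisMaxSum
-- ===== SOURCE A (Python) =====
-- def nonLisMaxSum(arr):
--     n = len(arr)
--     dp_len = [1] * n
--     dp_sum = arr[:]
--
--     for i in range(1, n):
--         for j in range(i):
--             if arr[j] < arr[i]:
--                 if dp_len[j] + 1 > dp_len[i]:
--                     dp_len[i] = dp_len[j] + 1
--                     dp_sum[i] = dp_sum[j] + arr[i]
--                 elif dp_len[j] + 1 == dp_len[i]: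
--                     dp_sum[i] = min(dp_sum[i], dp_sum[j] + arr[i])
--
--     max_len = max(dp_len)
--     min_sum = float('inf')
--
--     for i in range(n):
--         if dp_len[i] == max_len:
--             min_sum = min(min_sum, dp_sum[i])
--
--     total_sum = sum(arr)
--     return total_sum - min_sum
-- ===== SOURCE B (Python) =====
-- def _comb(p, q):
--     if q[0] > p[0]:
--         return q
--     if q[0] == p[0]:
--         return (p[0], min(p[1], q[1]))
--     return p
--
-- def _build(n):
--     # functional segment tree over positions [0, n): ('L', val) | ('N', val, size, left, right)
--     if n <= 1:
--         return ('L', (0, 0))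
--     return ('N', (0, 0), n, _build(n // 2), _build(n - n // 2))
--
-- def _update(t, i, p):
--     if t[0] == 'L':
--         return ('L', _comb(t[1], p))
--     _, v, size, l, r = t
--     half = size // 2
--     if i < half:
--         return ('N', _comb(v, p), size, _update(l, i, p), r)
--     return ('N', _comb(v, p), size, l, _update(r, i - half, p))
--
-- def _query(t, k):
--     # combined value over positions < k
--     if k <= 0:
--         return (0, 0)
--     if t[0] == 'L':
--         return t[1]
--     _, v, size, l, r = t
--     if k >= size:
--         return v
--     half = size // 2
--     return _comb(_query(l, k), _query(r, k - half))
--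
-- def nonLisMaxSum(arr):
--     vals = sorted(set(arr))
--     rank = {v: i for i, v in enumerate(vals)}
--     tree = _build(len(vals))
--     top = (0, 0)
--     for x in arr:
--         r = rank[x]
--         p = _query(tree, r)          # best (maxlen, minsum) over values < x
--         cur = (p[0] + 1, p[1] + x)
--         tree = _update(tree, r, cur)
--         top = _comb(top, cur)
--     return sum(arr) - top[1]
-- ===== Notes on version B (the rewrite author's own statement) =====
-- stated objective: faster
-- what changed: A runs the O(n^2) pairwise LIS DP over index arrays with two final scans; B coordinate-compresses the values, builds a functional segment tree over value ranks storing merged (max-length, min-sum) states, and answers each element's 'best state among smaller values' by an O(log n) prefix query plus a point update, maintaining the answer online.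
-- outside the precondition, e.g. on nonLisMaxSum([]): A raises ValueError, B returns 0
import Mathlib
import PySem

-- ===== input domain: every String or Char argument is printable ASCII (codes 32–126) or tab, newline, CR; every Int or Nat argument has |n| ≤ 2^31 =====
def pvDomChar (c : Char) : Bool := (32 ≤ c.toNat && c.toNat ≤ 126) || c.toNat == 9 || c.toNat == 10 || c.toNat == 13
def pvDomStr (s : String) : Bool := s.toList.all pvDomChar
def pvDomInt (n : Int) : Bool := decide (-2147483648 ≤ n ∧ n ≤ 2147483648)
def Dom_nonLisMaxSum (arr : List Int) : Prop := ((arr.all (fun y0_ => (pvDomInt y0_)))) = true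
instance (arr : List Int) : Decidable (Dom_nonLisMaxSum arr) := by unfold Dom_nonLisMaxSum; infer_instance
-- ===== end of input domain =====

-- B replaces A's O(n^2) pairwise DP by a segment tree over compressed values storing merged
-- (max length, min sum) states, queried by value-rank prefix (objective: faster, O(n log n)).

-- ===== PORT A =====
-- literal port of A; the dp state is the pair of lists (dp_len, dp_sum); the loop bodies are
-- named helpers. Python's float('inf') seed of min_sum is modelled as Option Int (none = inf),
-- exact because arr ≠ [] (Pre_) guarantees some index qualifies.
def pvABody (arr : List Int) (i : Int) (st : List Int × List Int) (j : Int) : List Int × List Int :=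
  if PySem.List.pyGetD arr j 0 < PySem.List.pyGetD arr i 0 then
    if PySem.List.pyGetD st.1 j 0 + 1 > PySem.List.pyGetD st.1 i 0 then
      (PySem.List.pySetD st.1 i (PySem.List.pyGetD st.1 j 0 + 1),
       PySem.List.pySetD st.2 i (PySem.List.pyGetD st.2 j 0 + PySem.List.pyGetD arr i 0))
    else if PySem.List.pyGetD st.1 j 0 + 1 = PySem.List.pyGetD st.1 i 0 then
      (st.1,
       PySem.List.pySetD st.2 i
         (min (PySem.List.pyGetD st.2 i 0)
              (PySem.List.pyGetD st.2 j 0 + PySem.List.pyGetD arr i 0)))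
    else st
  else st

def pvAInner (arr : List Int) (i : Int) (st : List Int × List Int) : List Int × List Int :=
  (PySem.List.pyRange 0 i 1).foldl (pvABody arr i) st

def pvAMinStep (dpl dps : List Int) (maxLen : Int) (acc : Option Int) (i : Int) : Option Int :=
  if PySem.List.pyGetD dpl i 0 = maxLen then
    some (match acc with
          | none => PySem.List.pyGetD dps i 0
          | some m => min m (PySem.List.pyGetD dps i 0))
  else acc

def nonLisMaxSum (arr : List Int) : Int :=
  let n : Int := PySem.List.len arr
  let dp_len : List Int := List.replicate arr.length 1
  let dp_sum : List Int := arr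
  let st := (PySem.List.pyRange 1 n 1).foldl (fun st i => pvAInner arr i st) (dp_len, dp_sum)
  let max_len : Int := (PySem.List.max? st.1 (fun y => y)).getD 0
  let min_sum : Option Int := (PySem.List.pyRange 0 n 1).foldl (pvAMinStep st.1 st.2 max_len) none
  let total_sum : Int := arr.sum
  total_sum - min_sum.getD 0

-- ===== PORT B =====
-- _comb in Source B
def pvComb (p q : Int × Int) : Int × Int :=
  if q.1 > p.1 then q else if q.1 = p.1 then (p.1, min p.2 q.2) else p

-- Source B's segment-tree nodes ('L', val) / ('N', val, size, left, right)
inductive PvTree where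
  | leaf : Int × Int → PvTree
  | node : Int × Int → Nat → PvTree → PvTree → PvTree

-- _build in Source B
def pvBuild (n : Nat) : PvTree :=
  if h : n ≤ 1 then .leaf (0, 0)
  else .node (0, 0) n (pvBuild (n / 2)) (pvBuild (n - n / 2))
decreasing_by all_goals omega

-- _update in Source B
def pvUpdate : PvTree → Int → (Int × Int) → PvTree
  | .leaf v, _, p => .leaf (pvComb v p)
  | .node v sz l r, i, p =>
      if i < ((sz / 2 : Nat) : Int) then .node (pvComb v p) sz (pvUpdate l i p) r
      else .node (pvComb v p) sz l (pvUpdate r (i - ((sz / 2 : Nat) : Int)) p)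

-- _query in Source B
def pvQuery : PvTree → Int → Int × Int
  | .leaf v, k => if k ≤ 0 then (0, 0) else v
  | .node v sz l r, k =>
      if k ≤ 0 then (0, 0)
      else if (sz : Int) ≤ k then v
      else pvComb (pvQuery l k) (pvQuery r (k - ((sz / 2 : Nat) : Int)))

-- body of Source B's 'for x in arr' loop; state = (tree, top)
def pvBStep (rank : PySem.Dict Int Int) (st : PvTree × (Int × Int)) (x : Int) :
    PvTree × (Int × Int) :=
  let r := rank.getD x 0
  let p := pvQuery st.1 r
  let cur := (p.1 + 1, p.2 + x)
  (pvUpdate st.1 r cur, pvComb st.2 cur)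

def nonLisMaxSum_alt (arr : List Int) : Int :=
  let vals := PySem.List.sorted (PySem.Set.ofList arr) (fun v => v) false
  let rank : PySem.Dict Int Int :=
    (PySem.List.enumerate vals 0).foldl (fun d p => d.insert p.2 p.1) PySem.Dict.empty
  let st := arr.foldl (pvBStep rank) (pvBuild vals.length, (0, 0))
  arr.sum - st.2.2

-- ===== PRECONDITION & SPEC =====
-- Pre_ excludes only the empty list, on which A raises ValueError (max of an empty sequence).
def Pre_nonLisMaxSum (arr : List Int) : Prop := arr ≠ []
instance (arr : List Int) : Decidable (Pre_nonLisMaxSum arr) := by unfold Pre_nonLisMaxSum; infer_instance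
def pvWitness_nonLisMaxSum : List Int := [3, 1, 2]

def Spec_nonLisMaxSum (arr : List Int) (out : Int) : Prop := out = nonLisMaxSum_alt arr
instance (arr : List Int) (out : Int) : Decidable (Spec_nonLisMaxSum arr out) := by unfold Spec_nonLisMaxSum; infer_instance

-- ===== CLAIM (what is proved, stated in full; the proofs are below) =====
def Claim_equal_nonLisMaxSum : Prop := ∀ (arr : List Int), Dom_nonLisMaxSum arr → Pre_nonLisMaxSum arr → Spec_nonLisMaxSum arr (nonLisMaxSum arr)

-- ===== LEMMAS AND PROOFS =====

-- canonical dp model shared by both correctness arguments: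
-- an entry (v, (l, s)) records: value v, and the merged (max length, min sum at that length)
-- of increasing subsequences ending at that position, exactly as both programs build them.
def pvPhi (x : Int) (p : Int × Int) : Int × Int := (p.1 + 1, p.2 + x)

def pvStep (x : Int) (c : Int × Int) (e : Int × (Int × Int)) : Int × Int :=
  if e.1 < x then pvComb c (pvPhi x e.2) else c

def pvExt (done : List (Int × (Int × Int))) (x : Int) : Int × Int :=
  done.foldl (pvStep x) (1, x)

def pvDps : List (Int × (Int × Int)) → List Int → List (Int × (Int × Int))
  | done, [] => done
  | done, x :: rest => pvDps (done ++ [(x, pvExt done x)]) rest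

def pvD (arr : List Int) : List (Int × (Int × Int)) := pvDps [] arr
def pvQ (arr : List Int) : List (Int × Int) := (pvD arr).map (·.2)
def pvTop (Q : List (Int × Int)) : Int × Int := Q.foldl pvComb (0, 0)
def pvBucket (P : List (Int × (Int × Int))) (v : Int) : Int × Int :=
  ((P.filter (fun e => e.1 == v)).map (·.2)).foldl pvComb (0, 0)

-- 'ok' states: the neutral (0,0) or a real dp state (length ≥ 1)
def pvOk (p : Int × Int) : Prop := p = (0, 0) ∨ 1 ≤ p.1

-- ----- algebra of pvComb -----
theorem pvComb_fst (p q : Int × Int) : (pvComb p q).1 = max p.1 q.1 := by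
  rcases p with ⟨a, b⟩; rcases q with ⟨c, d⟩
  unfold pvComb; split_ifs <;> simp only [] <;> omega

theorem pvComb_comm (p q : Int × Int) : pvComb p q = pvComb q p := by
  rcases p with ⟨a, b⟩; rcases q with ⟨c, d⟩
  unfold pvComb
  split_ifs <;> simp only [Prod.mk.injEq] <;> first | rfl | omega

theorem pvComb_assoc (p q r : Int × Int) : pvComb (pvComb p q) r = pvComb p (pvComb q r) := by
  rcases p with ⟨a, b⟩; rcases q with ⟨c, d⟩; rcases r with ⟨e, f⟩
  unfold pvComb
  simp only [min_def]
  split_ifs <;> first | rfl | omega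

theorem pvComb_right_comm (p q r : Int × Int) : pvComb (pvComb p q) r = pvComb (pvComb p r) q := by
  rw [pvComb_assoc, pvComb_assoc, pvComb_comm q r]

theorem pvComb_zero_left (q : Int × Int) (h : 1 ≤ q.1) : pvComb (0, 0) q = q := by
  rcases q with ⟨c, d⟩
  unfold pvComb
  split_ifs <;> first | rfl | omega

theorem pvComb_ok (p q : Int × Int) (hp : pvOk p) (hq : pvOk q) : pvOk (pvComb p q) := by
  rcases hp with hp | hp
  · rcases hq with hq | hq
    · subst hp; subst hq; left; rfl
    · right; rw [pvComb_fst]; omega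
  · right; rw [pvComb_fst]; omega

theorem pvComb_zero_left' (q : Int × Int) (h : pvOk q) : pvComb (0, 0) q = q := by
  rcases h with h | h
  · subst h; rfl
  · exact pvComb_zero_left q h

theorem pvComb_zero_right' (p : Int × Int) (h : pvOk p) : pvComb p (0, 0) = p := by
  rw [pvComb_comm]; exact pvComb_zero_left' p h

theorem pvComb_fst_ge_left (p q : Int × Int) : p.1 ≤ (pvComb p q).1 := by
  rw [pvComb_fst]; exact le_max_left _ _

theorem pvFold_ok (xs : List (Int × Int)) (t : Int × Int) (ht : pvOk t)
    (hxs : ∀ q ∈ xs, pvOk q) : pvOk (xs.foldl pvComb t) := by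
  induction xs generalizing t with
  | nil => exact ht
  | cons a l ih =>
      exact ih (pvComb t a) (pvComb_ok t a ht (hxs a (by simp)))
        (fun q hq => hxs q (by simp [hq]))

theorem pvPhi_comb (x : Int) (p q : Int × Int) :
    pvPhi x (pvComb p q) = pvComb (pvPhi x p) (pvPhi x q) := by
  rcases p with ⟨a, b⟩; rcases q with ⟨c, d⟩
  unfold pvComb pvPhi
  simp only [min_def]
  split_ifs <;> first | rfl | omega

theorem pvPhi_foldl (x : Int) (l : List (Int × Int)) (t : Int × Int) :
    pvPhi x (l.foldl pvComb t) = (l.map (pvPhi x)).foldl pvComb (pvPhi x t) := by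
  induction l generalizing t with
  | nil => rfl
  | cons h tl ih => simp only [List.foldl_cons, List.map_cons, ih, pvPhi_comb]

theorem pvComb_absorb (g : List (Int × Int)) (t : Int × Int) (ht : pvOk t)
    (hg : ∀ e ∈ g, pvOk e) : g.foldl pvComb t = pvComb t (g.foldl pvComb (0, 0)) := by
  induction g generalizing t with
  | nil => exact (pvComb_zero_right' t ht).symm
  | cons h tl ih =>
      have h1 : pvOk h := hg h (by simp)
      have := ih (pvComb t h) (pvComb_ok t h ht h1) (fun e he => hg e (by simp [he]))
      simp only [List.foldl_cons, this, pvComb_zero_left' h h1]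
      rw [pvComb_assoc, ← ih h h1 (fun e he => hg e (by simp [he]))]

theorem pvFold_append (a b : List (Int × Int)) (ha : ∀ e ∈ a, pvOk e) (hb : ∀ e ∈ b, pvOk e) :
    (a ++ b).foldl pvComb (0, 0) = pvComb (a.foldl pvComb (0, 0)) (b.foldl pvComb (0, 0)) := by
  rw [List.foldl_append]
  exact pvComb_absorb b _ (pvFold_ok a (0, 0) (Or.inl rfl) ha) hb

theorem pvFold_set (xs : List (Int × Int)) (p : Int × Int) (hp : 1 ≤ p.1)
    (hok : ∀ q ∈ xs, pvOk q) (i : Nat) (hi : i < xs.length) :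
    (xs.set i (pvComb (xs[i]'hi) p)).foldl pvComb (0, 0)
      = pvComb (xs.foldl pvComb (0, 0)) p := by
  induction xs generalizing i with
  | nil => simp at hi
  | cons a t ih =>
      have hta : pvOk a := hok a (by simp)
      have htt : ∀ q ∈ t, pvOk q := fun q hq => hok q (by simp [hq])
      cases i with
      | zero =>
          simp only [List.getElem_cons_zero, List.set_cons_zero, List.foldl_cons]
          rw [pvComb_zero_left' _ (pvComb_ok a p hta (Or.inr hp)),
              pvComb_zero_left' a hta,
              pvComb_absorb t _ (pvComb_ok a p hta (Or.inr hp)) htt,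
              pvComb_absorb t a hta htt, pvComb_right_comm]
      | succ i =>
          have hi' : i < t.length := by simpa using hi
          simp only [List.getElem_cons_succ, List.set_cons_succ, List.foldl_cons]
          rw [pvComb_zero_left' a hta,
              pvComb_absorb _ a hta (fun q hq => by
                rcases List.mem_or_eq_of_mem_set hq with h | h
                · exact htt q h
                · subst h
                  exact pvComb_ok _ p (htt _ (List.getElem_mem hi')) (Or.inr hp)),
              pvComb_absorb t a hta htt, ih htt i hi', ← pvComb_assoc]

-- ----- pvDps structure -----
theorem pvDps_append (d : List (Int × (Int × Int))) (l : List Int) (x : Int) :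
    pvDps d (l ++ [x]) = pvDps d l ++ [(x, pvExt (pvDps d l) x)] := by
  induction l generalizing d with
  | nil => rfl
  | cons y l ih => simpa [pvDps] using ih (d ++ [(y, pvExt d y)])

theorem pvDps_keys (l : List Int) (d : List (Int × (Int × Int))) :
    (pvDps d l).map (·.1) = d.map (·.1) ++ l := by
  induction l generalizing d with
  | nil => simp [pvDps]
  | cons y l ih => simpa [pvDps] using ih (d ++ [(y, pvExt d y)])

theorem pvDps_length (l : List Int) (d : List (Int × (Int × Int))) :
    (pvDps d l).length = d.length + l.length := by
  have := congrArg List.length (pvDps_keys l d)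
  simpa using this

theorem pvExt_fst_ge_one (d : List (Int × (Int × Int))) (x : Int) : 1 ≤ (pvExt d x).1 := by
  unfold pvExt
  have : ∀ (l : List (Int × (Int × Int))) (c : Int × Int),
      c.1 ≤ (l.foldl (pvStep x) c).1 := by
    intro l
    induction l with
    | nil => exact fun c => le_refl _
    | cons e tl ih =>
        intro c
        refine le_trans ?_ (ih (pvStep x c e))
        unfold pvStep
        split_ifs
        · exact pvComb_fst_ge_left _ _
        · exact le_refl _
  exact this d (1, x)

theorem pvDps_ge_one (l : List Int) (d : List (Int × (Int × Int)))
    (hd : ∀ e ∈ d, 1 ≤ e.2.1) : ∀ e ∈ pvDps d l, 1 ≤ e.2.1 := by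
  induction l generalizing d with
  | nil => simpa [pvDps] using hd
  | cons y l ih =>
      refine ih (d ++ [(y, pvExt d y)]) ?_
      intro e he
      rcases List.mem_append.1 he with h | h
      · exact hd e h
      · simp at h; subst h; exact pvExt_fst_ge_one d y

theorem pvD_ge_one (arr : List Int) : ∀ e ∈ pvD arr, 1 ≤ e.2.1 :=
  pvDps_ge_one arr [] (by simp)

theorem pvD_keys (arr : List Int) : (pvD arr).map (·.1) = arr := by
  simpa using pvDps_keys arr []

theorem pvD_length (arr : List Int) : (pvD arr).length = arr.length := by
  simpa using pvDps_length arr []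

theorem pvD_take_succ (arr : List Int) (i : Nat) (h : i < arr.length) :
    pvD (arr.take (i + 1)) = pvD (arr.take i) ++ [(arr[i], pvExt (pvD (arr.take i)) arr[i])] := by
  rw [List.take_succ_eq_append_getElem h]
  exact pvDps_append [] (arr.take i) arr[i]

-- ----- A-side: the dp arrays computed by the nested loops -----
def pvStL (arr : List Int) (k : Nat) : List Int :=
  (pvD (arr.take k)).map (fun e => e.2.1) ++ List.replicate (arr.length - k) 1

def pvStS (arr : List Int) (k : Nat) : List Int :=
  (pvD (arr.take k)).map (fun e => e.2.2) ++ arr.drop k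

theorem pvStL_length (arr : List Int) (k : Nat) (h : k ≤ arr.length) :
    (pvStL arr k).length = arr.length := by
  simp [pvStL, pvD_length]; omega

theorem pvStS_length (arr : List Int) (k : Nat) (h : k ≤ arr.length) :
    (pvStS arr k).length = arr.length := by
  simp [pvStS, pvD_length]; omega

theorem pvAInner_eq (arr : List Int) (i : Nat) (h2 : i < arr.length) :
    pvAInner arr (i : Int) (pvStL arr i, pvStS arr i) = (pvStL arr (i + 1), pvStS arr (i + 1)) := by
  have hile : i ≤ arr.length := le_of_lt h2
  have hPlen : (pvD (arr.take i)).length = i := by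
    rw [pvD_length, List.length_take]; omega
  have hLlen : (pvStL arr i).length = arr.length := pvStL_length arr i hile
  have hSlen : (pvStS arr i).length = arr.length := pvStS_length arr i hile
  have hLi : (pvStL arr i)[i]'(by omega) = 1 := by
    unfold pvStL
    rw [List.getElem_append_right (by simp [hPlen])]
    simp [hPlen]
  have hSi : (pvStS arr i)[i]'(by omega) = arr[i] := by
    unfold pvStS
    rw [List.getElem_append_right (by simp [hPlen])]
    simp [hPlen]
  have hLj : ∀ (j : Nat) (hj : j < i), (pvStL arr i)[j]'(by omega) = ((pvD (arr.take i))[j]'(by omega)).2.1 := by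
    intro j hj
    unfold pvStL
    rw [List.getElem_append_left (by simp [hPlen]; omega)]
    simp
  have hSj : ∀ (j : Nat) (hj : j < i), (pvStS arr i)[j]'(by omega) = ((pvD (arr.take i))[j]'(by omega)).2.2 := by
    intro j hj
    unfold pvStS
    rw [List.getElem_append_left (by simp [hPlen]; omega)]
    simp
  have hKj : ∀ (j : Nat) (hj : j < i), ((pvD (arr.take i))[j]'(by omega)).1 = arr[j]'(by omega) := by
    intro j hj
    have hk := pvD_keys (arr.take i)
    have := congrArg (fun l => l[j]?) hk
    simp only [List.getElem?_map] at this
    rw [List.getElem?_take_of_lt (by omega)] at this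
    rw [List.getElem?_eq_getElem (by omega), List.getElem?_eq_getElem (by omega)] at this
    simpa using this
  have inv : ∀ j, j ≤ i →
      (PySem.List.pyRange 0 (j : Int) 1).foldl (pvABody arr (i : Int)) (pvStL arr i, pvStS arr i)
        = ((pvStL arr i).set i (((pvD (arr.take i)).take j).foldl (pvStep (arr[i]'h2)) (1, arr[i]'h2)).1,
           (pvStS arr i).set i (((pvD (arr.take i)).take j).foldl (pvStep (arr[i]'h2)) (1, arr[i]'h2)).2) := by
    intro j
    induction j with
    | zero =>
        intro _
        rw [show ((0 : Nat) : Int) = 0 from rfl, PySem.List.pyRange_one_eq_nil (le_refl 0)]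
        simp only [List.take_zero, List.foldl_nil]
        rw [← hLi, ← hSi, List.set_getElem_self, List.set_getElem_self]
    | succ j ihj =>
        intro hji
        have hj : j < i := by omega
        have hcast : ((j + 1 : Nat) : Int) = (j : Int) + 1 := by push_cast; ring
        rw [hcast, PySem.List.pyRange_one_succ_right (by positivity), List.foldl_append,
            ihj (by omega), List.foldl_cons, List.foldl_nil]
        have htake : (pvD (arr.take i)).take (j + 1)
            = (pvD (arr.take i)).take j ++ [(pvD (arr.take i))[j]'(by omega)] :=
          List.take_succ_eq_append_getElem (by omega)
        rw [htake, List.foldl_append, List.foldl_cons, List.foldl_nil]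
        set c := ((pvD (arr.take i)).take j).foldl (pvStep (arr[i]'h2)) (1, arr[i]'h2) with hc
        set e := (pvD (arr.take i))[j]'(by omega) with he
        -- evaluate the loop body
        have hij : i ≠ j := by omega
        unfold pvABody
        simp only [PySem.List.pyGetD_natCast, PySem.List.pySetD_natCast]
        have rAj : arr.getD j 0 = arr[j]'(by omega) := List.getD_eq_getElem arr 0 (by omega)
        have rAi : arr.getD i 0 = arr[i]'h2 := List.getD_eq_getElem arr 0 (by omega)
        have rLj : ((pvStL arr i).set i c.1).getD j 0 = e.2.1 := by
          rw [List.getD_eq_getElem _ 0 (by rw [List.length_set]; omega),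
              List.getElem_set_ne hij, hLj j hj]
        have rLi : ((pvStL arr i).set i c.1).getD i 0 = c.1 := by
          rw [List.getD_eq_getElem _ 0 (by rw [List.length_set]; omega), List.getElem_set_self]
        have rSj : ((pvStS arr i).set i c.2).getD j 0 = e.2.2 := by
          rw [List.getD_eq_getElem _ 0 (by rw [List.length_set]; omega),
              List.getElem_set_ne hij, hSj j hj]
        have rSi : ((pvStS arr i).set i c.2).getD i 0 = c.2 := by
          rw [List.getD_eq_getElem _ 0 (by rw [List.length_set]; omega), List.getElem_set_self]
        rw [rAj, rAi, rLj, rLi, rSj, rSi]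
        have hKe : e.1 = arr[j]'(by omega) := by rw [he]; exact hKj j hj
        rw [← hKe]
        unfold pvStep
        by_cases hb : e.1 < arr[i]'h2
        · rw [if_pos hb, if_pos hb]
          unfold pvComb pvPhi
          by_cases hgt : e.2.1 + 1 > c.1
          · rw [if_pos hgt, if_pos (by simpa using hgt)]
            simp [List.set_set]
          · rw [if_neg hgt]
            by_cases heq2 : e.2.1 + 1 = c.1
            · rw [if_pos heq2, if_neg (by simpa using hgt), if_pos (by simpa using heq2)]
              simp [List.set_set]
            · rw [if_neg heq2, if_neg (by simpa using hgt), if_neg (by simpa using heq2)]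
        · rw [if_neg hb, if_neg hb]
  have hfinal := inv i (le_refl i)
  have htakeall : (pvD (arr.take i)).take i = pvD (arr.take i) :=
    List.take_of_length_le (by omega)
  rw [htakeall] at hfinal
  unfold pvAInner
  rw [hfinal]
  have hrepl : List.replicate (arr.length - i) (1 : Int)
      = 1 :: List.replicate (arr.length - (i + 1)) 1 := by
    have : arr.length - i = (arr.length - (i + 1)) + 1 := by omega
    rw [this, List.replicate_succ]
  have set_surgery : ∀ (xs ys : List Int) (v : Int) (k : Nat), k = xs.length →
      (xs ++ ys).set k v = xs ++ ys.set 0 v := by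
    intro xs ys v k hk
    subst hk
    rw [List.set_append_right _ _ (le_refl _)]
    simp
  have hext : List.foldl (pvStep (arr[i]'h2)) (1, arr[i]'h2) (pvD (arr.take i))
      = pvExt (pvD (arr.take i)) (arr[i]'h2) := rfl
  have hL : (pvStL arr i).set i (pvExt (pvD (arr.take i)) (arr[i]'h2)).1 = pvStL arr (i + 1) := by
    unfold pvStL
    rw [hrepl, set_surgery _ _ _ i (by simp [hPlen]), pvD_take_succ arr i h2, List.map_append]
    simp [List.set_cons_zero]
  have hS : (pvStS arr i).set i (pvExt (pvD (arr.take i)) (arr[i]'h2)).2 = pvStS arr (i + 1) := by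
    unfold pvStS
    rw [List.drop_eq_getElem_cons (show i < arr.length from h2),
        set_surgery _ _ _ i (by simp [hPlen]), pvD_take_succ arr i h2, List.map_append]
    rw [List.set_cons_zero]
    simp
  rw [hext, hL, hS]

theorem pvAOuter_aux (arr : List Int) : ∀ (d k : Nat), 1 ≤ k → k ≤ arr.length →
    arr.length - k = d →
    (PySem.List.pyRange (k : Int) (arr.length : Int) 1).foldl (fun st i => pvAInner arr i st)
      (pvStL arr k, pvStS arr k) = (pvStL arr arr.length, pvStS arr arr.length) := by
  intro d
  induction d with
  | zero =>
      intro k h1 h2 hd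
      have hk : k = arr.length := by omega
      subst hk
      rw [PySem.List.pyRange_one_eq_nil (le_refl _)]
      rfl
  | succ d ih =>
      intro k h1 h2 hd
      have hklt : k < arr.length := by omega
      rw [PySem.List.pyRange_one_cons (by exact_mod_cast hklt), List.foldl_cons,
          pvAInner_eq arr k hklt]
      have : ((k : Int) + 1) = ((k + 1 : Nat) : Int) := by push_cast; ring
      rw [this, ih (k + 1) (by omega) (by omega) (by omega)]

theorem pvAOuter (arr : List Int) (k : Nat) (h1 : 1 ≤ k) (h2 : k ≤ arr.length) :
    (PySem.List.pyRange (k : Int) (arr.length : Int) 1).foldl (fun st i => pvAInner arr i st)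
      (pvStL arr k, pvStS arr k) = (pvStL arr arr.length, pvStS arr arr.length) :=
  pvAOuter_aux arr (arr.length - k) k h1 h2 rfl

theorem pvAInit (arr : List Int) (h : arr ≠ []) :
    (List.replicate arr.length (1 : Int), arr) = (pvStL arr 1, pvStS arr 1) := by
  rcases arr with _ | ⟨a, t⟩
  · exact absurd rfl h
  · simp [pvStL, pvStS, pvD, pvDps, pvExt, List.replicate_succ]

theorem pvStL_final (arr : List Int) : pvStL arr arr.length = (pvQ arr).map (·.1) := by
  simp [pvStL, pvQ, pvD]
theorem pvStS_final (arr : List Int) : pvStS arr arr.length = (pvQ arr).map (·.2) := by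
  simp [pvStS, pvQ, pvD]

-- ----- A-side: the two final passes -----
theorem pvTop_fst (Q : List (Int × Int)) (t : Int × Int) :
    (Q.foldl pvComb t).1 = Q.foldl (fun m p => max m p.1) t.1 := by
  induction Q generalizing t with
  | nil => rfl
  | cons p tl ih => simp only [List.foldl_cons, ih, pvComb_fst]

theorem pvMax_char (Q : List (Int × Int)) (hne : Q ≠ []) (h1 : ∀ p ∈ Q, 1 ≤ p.1) :
    (PySem.List.max? (Q.map (·.1)) (fun y => y)).getD 0 = (pvTop Q).1 := by
  rcases Q with _ | ⟨q, tl⟩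
  · exact absurd rfl hne
  · have hq : 1 ≤ q.1 := h1 q (by simp)
    rw [show ((q :: tl).map (·.1)) = q.1 :: tl.map (·.1) from rfl,
        PySem.List.max?_id_cons, Option.getD_some]
    unfold pvTop
    rw [pvTop_fst]
    simp only [List.foldl_cons]
    rw [List.foldl_map]
    have h0 : max (0 : Int) q.1 = q.1 := by omega
    rw [h0]

def pvMStep (M : Int) (acc : Option Int) (p : Int × Int) : Option Int :=
  if p.1 = M then some (match acc with | none => p.2 | some m => min m p.2) else acc

theorem pvMinFold_bridge_gen (Q R : List (Int × Int)) (M : Int) (acc : Option Int)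
    (hpre : Q <+: R) :
    (PySem.List.pyRange 0 (Q.length : Int) 1).foldl
        (pvAMinStep (R.map (·.1)) (R.map (·.2)) M) acc
      = Q.foldl (pvMStep M) acc := by
  induction Q using List.reverseRecOn generalizing acc with
  | nil => simp [PySem.List.pyRange_one_eq_nil]
  | append_singleton T p ih =>
      have hT : T <+: R := (T.prefix_append [p]).trans hpre
      have hlen : T.length < R.length := by
        have := hpre.length_le; simp at this; omega
      have hcast : ((T ++ [p]).length : Int) = (T.length : Int) + 1 := by simp
      rw [hcast, PySem.List.pyRange_one_succ_right (by positivity), List.foldl_append,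
          List.foldl_append, ih acc hT]
      simp only [List.foldl_cons, List.foldl_nil]
      have hgetp : R[T.length] = p := by
        have := hpre.getElem (i := T.length) (by simp)
        simpa using this.symm
      unfold pvAMinStep pvMStep
      rw [PySem.List.pyGetD_natCast, PySem.List.pyGetD_natCast,
          List.getD_eq_getElem _ _ (by simpa using hlen),
          List.getD_eq_getElem _ _ (by simpa using hlen)]
      simp [hgetp]
theorem pvMinFold_bridge (Q : List (Int × Int)) (M : Int) :
    (PySem.List.pyRange 0 (Q.length : Int) 1).foldl
        (pvAMinStep (Q.map (·.1)) (Q.map (·.2)) M) none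
      = Q.foldl (pvMStep M) none :=
  pvMinFold_bridge_gen Q Q M none (List.prefix_refl Q)

theorem pvMStep_none (R : List (Int × Int)) (M : Int) (h : ∀ q ∈ R, q.1 ≠ M) :
    R.foldl (pvMStep M) none = none := by
  induction R with
  | nil => rfl
  | cons q tl ih =>
      have : pvMStep M none q = none := by
        unfold pvMStep; rw [if_neg (h q (by simp))]
      rw [List.foldl_cons, this]
      exact ih (fun r hr => h r (by simp [hr]))

theorem pvTop_fst_isMax (Q : List (Int × Int)) : ∀ q ∈ Q, q.1 ≤ (pvTop Q).1 := by
  intro q hq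
  rw [pvTop, pvTop_fst]
  exact (PySem.List.le_foldl_max_int Q (·.1) 0).2 q hq

theorem pvTop_fst_pos (Q : List (Int × Int)) (hne : Q ≠ []) (h1 : ∀ p ∈ Q, 1 ≤ p.1) :
    1 ≤ (pvTop Q).1 := by
  rcases Q with _ | ⟨q, tl⟩
  · exact absurd rfl hne
  · exact le_trans (h1 q (by simp)) (pvTop_fst_isMax _ q (by simp))

theorem pvMin_char_gen (Q : List (Int × Int)) (M : Int) (hne : Q ≠ []) (h1 : ∀ p ∈ Q, 1 ≤ p.1)
    (hM : M = (pvTop Q).1) : Q.foldl (pvMStep M) none = some ((pvTop Q).2) := by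
  induction Q using List.reverseRecOn generalizing M with
  | nil => exact absurd rfl hne
  | append_singleton T p ih =>
      have hp1 : 1 ≤ p.1 := h1 p (by simp)
      have htop : pvTop (T ++ [p]) = pvComb (pvTop T) p := by
        unfold pvTop; rw [List.foldl_append]; rfl
      rcases eq_or_ne T [] with hT | hT
      · subst hT
        simp only [List.nil_append] at htop hM ⊢
        have hcomb : pvTop [p] = p := by
          unfold pvTop; simp only [List.foldl_cons, List.foldl_nil]
          exact pvComb_zero_left p hp1
        rw [hcomb] at hM ⊢
        simp [pvMStep, hM]
      · have h1T : ∀ q ∈ T, 1 ≤ q.1 := fun q hq => h1 q (by simp [hq])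
        have hTpos : 1 ≤ (pvTop T).1 := pvTop_fst_pos T hT h1T
        rw [htop] at hM
        rw [List.foldl_append, htop]
        rcases lt_trichotomy p.1 (pvTop T).1 with hlt | heq | hgt
        · have hcomb : pvComb (pvTop T) p = pvTop T := by
            unfold pvComb; rw [if_neg (by omega), if_neg (by omega)]
          rw [hcomb] at hM ⊢
          rw [ih M hT h1T hM]
          simp only [List.foldl_cons, List.foldl_nil]
          unfold pvMStep; rw [if_neg (by omega)]
        · have hcomb : pvComb (pvTop T) p = ((pvTop T).1, min (pvTop T).2 p.2) := by
            unfold pvComb; rw [if_neg (by omega), if_pos (by omega)]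
          rw [hcomb] at hM ⊢
          have hM' : M = (pvTop T).1 := by simpa using hM
          rw [ih M hT h1T hM']
          simp only [List.foldl_cons, List.foldl_nil]
          unfold pvMStep
          rw [if_pos (by omega)]
        · have hcomb : pvComb (pvTop T) p = p := by
            unfold pvComb; rw [if_pos (by omega)]
          rw [hcomb] at hM ⊢
          have hnone : T.foldl (pvMStep M) none = none := by
            refine pvMStep_none T M (fun q hq => ?_)
            have := pvTop_fst_isMax T q hq
            omega
          rw [hnone]
          simp only [List.foldl_cons, List.foldl_nil]
          unfold pvMStep
          rw [hM, if_pos rfl]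

theorem pvMin_char (Q : List (Int × Int)) (hne : Q ≠ []) (h1 : ∀ p ∈ Q, 1 ≤ p.1) :
    Q.foldl (pvMStep ((pvTop Q).1)) none = some ((pvTop Q).2) :=
  pvMin_char_gen Q _ hne h1 rfl

theorem pvA_eq (arr : List Int) (h : arr ≠ []) :
    nonLisMaxSum arr = arr.sum - (pvTop (pvQ arr)).2 := by
  have hlen : 1 ≤ arr.length := List.length_pos_iff.2 h
  have hQlen : (pvQ arr).length = arr.length := by simp [pvQ, pvD_length]
  have hQne : pvQ arr ≠ [] := by
    intro hc
    rw [hc] at hQlen; simp at hQlen; omega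
  have hQ1 : ∀ p ∈ pvQ arr, 1 ≤ p.1 := by
    intro p hp
    rcases List.mem_map.1 hp with ⟨e, he, rfl⟩
    exact pvD_ge_one arr e he
  unfold nonLisMaxSum
  simp only [PySem.List.len_eq]
  have houter := pvAOuter arr 1 (le_refl 1) hlen
  rw [Nat.cast_one] at houter
  rw [pvAInit arr h, houter, pvStL_final, pvStS_final]
  rw [pvMax_char (pvQ arr) hQne hQ1]
  rw [show (arr.length : Int) = ((pvQ arr).length : Int) from by rw [hQlen],
      pvMinFold_bridge (pvQ arr) ((pvTop (pvQ arr)).1),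
      pvMin_char (pvQ arr) hQne hQ1]
  rfl

-- ----- B-side: the segment-tree model -----
def pvMod : PvTree → List (Int × Int) → Prop
  | .leaf v, xs => xs = [v]
  | .node v sz l r, xs =>
      xs.length = sz ∧ 2 ≤ sz ∧ pvMod l (xs.take (sz / 2)) ∧ pvMod r (xs.drop (sz / 2))
        ∧ v = xs.foldl pvComb (0, 0)

theorem pvFold_replicate_zero (k : Nat) :
    (List.replicate k ((0, 0) : Int × Int)).foldl pvComb (0, 0) = (0, 0) := by
  induction k with
  | zero => rfl
  | succ k ih => rw [List.replicate_succ, List.foldl_cons]; exact ih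

theorem pvBuild_mod (n : Nat) (h : 1 ≤ n) :
    pvMod (pvBuild n) (List.replicate n ((0, 0) : Int × Int)) := by
  induction n using Nat.strong_induction_on with
  | _ n ih =>
      rw [pvBuild]
      by_cases h1 : n ≤ 1
      · rw [dif_pos h1]
        have : n = 1 := by omega
        subst this
        simp [pvMod, List.replicate_succ]
      · rw [dif_neg h1]
        refine ⟨by simp, by omega, ?_, ?_, ?_⟩
        · rw [List.take_replicate, min_eq_left (by omega)]
          exact ih (n / 2) (by omega) (by omega)
        · rw [List.drop_replicate]
          exact ih (n - n / 2) (by omega) (by omega)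
        · rw [pvFold_replicate_zero]

theorem pvSet_take (xs : List (Int × Int)) (m i : Nat) (v : Int × Int) (hi : i < m) :
    (xs.set i v).take m = (xs.take m).set i v := by
  apply List.ext_getElem
  · simp
  · intro j hj1 hj2
    simp [List.getElem_take, List.getElem_set]

theorem pvSet_take_ge (xs : List (Int × Int)) (m i : Nat) (v : Int × Int) (hi : m ≤ i) :
    (xs.set i v).take m = xs.take m := by
  apply List.ext_getElem
  · simp
  · intro j hj1 hj2
    simp only [List.getElem_take, List.getElem_set]
    rw [if_neg (by simp at hj1; omega)]

theorem pvSet_drop (xs : List (Int × Int)) (m i : Nat) (v : Int × Int) (hi : m ≤ i) :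
    (xs.set i v).drop m = (xs.drop m).set (i - m) v := by
  apply List.ext_getElem
  · simp
  · intro j hj1 hj2
    simp only [List.getElem_drop, List.getElem_set]
    by_cases h : i = m + j
    · rw [if_pos (by omega), if_pos (by omega)]
    · rw [if_neg (by omega), if_neg (by omega)]

theorem pvSet_drop_lt (xs : List (Int × Int)) (m i : Nat) (v : Int × Int) (hi : i < m) :
    (xs.set i v).drop m = xs.drop m := by
  apply List.ext_getElem
  · simp
  · intro j hj1 hj2
    simp only [List.getElem_drop, List.getElem_set]
    rw [if_neg (by omega)]

theorem pvUpdate_mod (t : PvTree) (xs : List (Int × Int)) (p : Int × Int) (hp : 1 ≤ p.1)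
    (hok : ∀ q ∈ xs, pvOk q) (hm : pvMod t xs) (i : Nat) (hi : i < xs.length) :
    pvMod (pvUpdate t (i : Int) p) (xs.set i (pvComb (xs[i]'hi) p)) := by
  induction t generalizing xs i with
  | leaf v =>
      rw [pvMod] at hm
      subst hm
      have : i = 0 := by simp at hi; omega
      subst this
      simp [pvUpdate, pvMod]
  | node v sz l r ihl ihr =>
      rcases hm with ⟨hlen, hsz, hml, hmr, hv⟩
      by_cases hcase : i < sz / 2
      · rw [show pvUpdate (.node v sz l r) (i : Int) p
            = if (i : Int) < ((sz / 2 : Nat) : Int) then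
                .node (pvComb v p) sz (pvUpdate l (i : Int) p) r
              else .node (pvComb v p) sz l (pvUpdate r ((i : Int) - ((sz / 2 : Nat) : Int)) p)
            from rfl,
           if_pos (by exact_mod_cast hcase)]
        refine ⟨by simp [hlen], hsz, ?_, ?_, ?_⟩
        · rw [pvSet_take _ _ _ _ hcase]
          have hgi : xs[i]'hi = (xs.take (sz / 2))[i]'(by rw [List.length_take]; omega) := by
            simp [List.getElem_take]
          rw [hgi]
          exact ihl (xs.take (sz / 2)) (fun q hq => hok q (List.mem_of_mem_take hq)) hml i
            (by rw [List.length_take]; omega)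
        · rw [pvSet_drop_lt _ _ _ _ hcase]
          exact hmr
        · rw [pvFold_set xs p hp hok i hi, hv]
      · push_neg at hcase
        rw [show pvUpdate (.node v sz l r) (i : Int) p
            = if (i : Int) < ((sz / 2 : Nat) : Int) then
                .node (pvComb v p) sz (pvUpdate l (i : Int) p) r
              else .node (pvComb v p) sz l (pvUpdate r ((i : Int) - ((sz / 2 : Nat) : Int)) p)
            from rfl,
           if_neg (by push_neg; exact_mod_cast hcase)]
        have hcast : (i : Int) - ((sz / 2 : Nat) : Int) = ((i - sz / 2 : Nat) : Int) := by omega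
        rw [hcast]
        refine ⟨by simp [hlen], hsz, ?_, ?_, ?_⟩
        · rw [pvSet_take_ge _ _ _ _ hcase]
          exact hml
        · rw [pvSet_drop _ _ _ _ hcase]
          have hgi : xs[i]'hi = (xs.drop (sz / 2))[i - sz / 2]'(by rw [List.length_drop]; omega) := by
            simp only [List.getElem_drop]
            congr 1
            omega
          rw [hgi]
          exact ihr (xs.drop (sz / 2)) (fun q hq => hok q (List.mem_of_mem_drop hq)) hmr
            (i - sz / 2) (by rw [List.length_drop]; omega)
        · rw [pvFold_set xs p hp hok i hi, hv]

theorem pvQuery_nonpos (t : PvTree) (k : Int) (hk : k ≤ 0) : pvQuery t k = (0, 0) := by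
  cases t <;> simp [pvQuery, hk]

theorem pvQuery_eq (t : PvTree) (xs : List (Int × Int)) (hok : ∀ q ∈ xs, pvOk q)
    (hm : pvMod t xs) (k : Nat) :
    pvQuery t (k : Int) = (xs.take k).foldl pvComb (0, 0) := by
  induction t generalizing xs k with
  | leaf v =>
      rw [pvMod] at hm
      subst hm
      cases k with
      | zero => simp [pvQuery]
      | succ k =>
          rw [show pvQuery (.leaf v) ((k + 1 : Nat) : Int)
              = if ((k + 1 : Nat) : Int) ≤ 0 then (0, 0) else v from rfl,
             if_neg (by omega), List.take_of_length_le (by simp)]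
          simp only [List.foldl_cons, List.foldl_nil]
          exact (pvComb_zero_left' v (hok v (by simp))).symm
  | node v sz l r ihl ihr =>
      rcases hm with ⟨hlen, hsz, hml, hmr, hv⟩
      have hokl : ∀ q ∈ xs.take (sz / 2), pvOk q := fun q hq => hok q (List.mem_of_mem_take hq)
      have hokr : ∀ q ∈ xs.drop (sz / 2), pvOk q := fun q hq => hok q (List.mem_of_mem_drop hq)
      have hunf : pvQuery (.node v sz l r) (k : Int)
          = if (k : Int) ≤ 0 then (0, 0)
            else if (sz : Int) ≤ (k : Int) then v
            else pvComb (pvQuery l (k : Int)) (pvQuery r ((k : Int) - ((sz / 2 : Nat) : Int))) := rfl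
      rcases Nat.eq_zero_or_pos k with h0 | hkpos
      · subst h0
        simp only [List.take_zero, List.foldl_nil]
        exact pvQuery_nonpos _ _ (by simp)
      · rw [hunf, if_neg (by omega)]
        by_cases hks : (sz : Int) ≤ (k : Int)
        · rw [if_pos hks, List.take_of_length_le (by omega), hv]
        · rw [if_neg hks]
          have hklt : k < sz := by omega
          by_cases hkh : k ≤ sz / 2
          · rw [ihl _ hokl hml k, List.take_take, min_eq_left hkh,
                pvQuery_nonpos r _ (by omega)]
            exact pvComb_zero_right' _
              (pvFold_ok _ _ (Or.inl rfl) (fun q hq => hok q (List.mem_of_mem_take hq)))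
          · push_neg at hkh
            have hcast : (k : Int) - ((sz / 2 : Nat) : Int) = ((k - sz / 2 : Nat) : Int) := by omega
            rw [ihl _ hokl hml k, hcast, ihr _ hokr hmr (k - sz / 2),
                List.take_take, min_eq_right (by omega)]
            rw [← pvFold_append _ _ (fun q hq => hok q (List.mem_of_mem_take hq))
                  (fun q hq => hok q (List.mem_of_mem_drop (List.mem_of_mem_take hq)))]
            have hsplit : xs.take (sz / 2) ++ (xs.drop (sz / 2)).take (k - sz / 2)
                = xs.take k := by
              rw [← List.take_add]
              congr 1
              omega
            rw [hsplit]

-- ----- B-side: positions grouped by value -----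
theorem pvPerm_groups (ks : List Int) (P : List (Int × (Int × Int))) (hnd : ks.Nodup)
    (hk : ∀ e ∈ P, e.1 ∈ ks) :
    P.Perm (ks.flatMap (fun v => P.filter (fun e => e.1 == v))) := by
  induction ks generalizing P with
  | nil =>
      have hP : P = [] := by
        cases P with
        | nil => rfl
        | cons e t => exact absurd (hk e (by simp)) (by simp)
      simp [hP]
  | cons v ks ih =>
      have hnd' : ks.Nodup := (List.nodup_cons.1 hnd).2
      have hv : v ∉ ks := (List.nodup_cons.1 hnd).1
      have hk' : ∀ e ∈ P.filter (fun e => !(e.1 == v)), e.1 ∈ ks := by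
        intro e he
        have hmem := List.mem_of_mem_filter he
        have hne : ¬ e.1 = v := by simpa using List.of_mem_filter he
        rcases List.mem_cons.1 (hk e hmem) with h | h
        · exact absurd h hne
        · exact h
      have ihh := ih (P.filter (fun e => !(e.1 == v))) hnd' hk'
      have hgroups : ∀ u ∈ ks,
          (P.filter (fun e => !(e.1 == v))).filter (fun e => e.1 == u)
            = P.filter (fun e => e.1 == u) := by
        intro u hu
        rw [List.filter_filter]
        apply List.filter_congr
        intro e _
        by_cases h : e.1 = u
        · have huv : ¬ (u = v) := by
            intro hh
            exact hv (hh ▸ hu)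
          simp [h, huv]
        · simp [h]
      have hflat : ks.flatMap (fun u => (P.filter (fun e => !(e.1 == v))).filter (fun e => e.1 == u))
          = ks.flatMap (fun u => P.filter (fun e => e.1 == u)) := by
        unfold List.flatMap
        exact congrArg List.flatten (List.map_congr_left hgroups)
      rw [hflat] at ihh
      have hperm : P.Perm (P.filter (fun e => e.1 == v)
          ++ ks.flatMap (fun u => P.filter (fun e => e.1 == u))) :=
        ((List.filter_append_perm _ P).symm).trans (ihh.append_left _)
      simpa [List.flatMap_cons] using hperm

theorem pvFoldl_comb_flat (ks : List Int) (g : Int → List (Int × Int)) (t : Int × Int)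
    (ht : pvOk t) (hg : ∀ v ∈ ks, ∀ e ∈ g v, pvOk e) :
    ks.foldl (fun c v => pvComb c ((g v).foldl pvComb (0, 0))) t
      = (ks.flatMap g).foldl pvComb t := by
  induction ks generalizing t with
  | nil => rfl
  | cons v ks ih =>
      rw [List.foldl_cons, List.flatMap_cons, List.foldl_append,
          ← pvComb_absorb (g v) t ht (hg v (by simp))]
      exact ih _ (pvFold_ok (g v) t ht (hg v (by simp))) (fun u hu => hg u (by simp [hu]))

-- the merged 'best among values < x' state extends to exactly the dp state of x
theorem pvCur_eq (l : List Int) (x : Int) (ks : List Int) (hnd : ks.Nodup)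
    (hlt : ∀ v ∈ ks, v < x) (hcov : ∀ y ∈ l, y < x → y ∈ ks) :
    pvPhi x ((ks.map (pvBucket (pvD l))).foldl pvComb (0, 0)) = pvExt (pvD l) x := by
  set P := (pvD l).filter (fun e => decide (e.1 < x)) with hP
  have hok2 : ∀ q ∈ P.map (·.2), pvOk q := by
    intro q hq
    rcases List.mem_map.1 hq with ⟨e, he, rfl⟩
    exact Or.inr (pvD_ge_one l e (List.mem_of_mem_filter he))
  -- RHS is phi of the merged filtered states
  have hAfilter : pvExt (pvD l) x
      = pvPhi x ((P.map (·.2)).foldl pvComb (0, 0)) := by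
    have h1 : pvExt (pvD l) x = P.foldl (fun c e => pvComb c (pvPhi x e.2)) (1, x) := by
      unfold pvExt
      rw [hP, List.foldl_filter]
      apply PySem.List.foldl_congr_mem
      intro acc e _
      unfold pvStep
      simp only [decide_eq_true_eq]
    rw [h1, pvPhi_foldl]
    have hphi0 : pvPhi x ((0, 0) : Int × Int) = (1, x) := by
      unfold pvPhi; simp
    rw [hphi0, List.map_map, List.foldl_map]
    rfl
  -- LHS: fold over the value buckets equals fold over the grouped states
  have hLHS : (ks.map (pvBucket (pvD l))).foldl pvComb (0, 0)
      = (P.map (·.2)).foldl pvComb (0, 0) := by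
    have hgok : ∀ v ∈ ks, ∀ e ∈ (((pvD l).filter (fun e => e.1 == v)).map (·.2)), pvOk e := by
      intro v _ e he
      rcases List.mem_map.1 he with ⟨e', he', rfl⟩
      exact Or.inr (pvD_ge_one l e' (List.mem_of_mem_filter he'))
    rw [List.foldl_map]
    have hstep : ks.foldl (fun c v => pvComb c (pvBucket (pvD l) v)) (0, 0)
        = (ks.flatMap (fun v => ((pvD l).filter (fun e => e.1 == v)).map (·.2))).foldl
            pvComb (0, 0) :=
      pvFoldl_comb_flat ks _ (0, 0) (Or.inl rfl) hgok
    rw [hstep]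
    have hmapflat : ks.flatMap (fun v => ((pvD l).filter (fun e => e.1 == v)).map (·.2))
        = (ks.flatMap (fun v => (pvD l).filter (fun e => e.1 == v))).map (·.2) := by
      rw [List.map_flatMap]
    rw [hmapflat]
    have hkmem : ∀ e ∈ P, e.1 ∈ ks := by
      intro e he
      have hmem := List.mem_of_mem_filter he
      have hltx : e.1 < x := by simpa using List.of_mem_filter he
      have : e.1 ∈ l := by
        rw [← pvD_keys l]
        exact List.mem_map_of_mem hmem
      exact hcov e.1 this hltx
    have hgrp : ∀ v ∈ ks, P.filter (fun e => e.1 == v) = (pvD l).filter (fun e => e.1 == v) := by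
      intro v hv
      have hvx : v < x := hlt v hv
      rw [hP, List.filter_filter]
      apply List.filter_congr
      intro e _
      by_cases h : e.1 = v
      · simp [h, hvx]
      · simp [h]
    have hflatg : ks.flatMap (fun v => P.filter (fun e => e.1 == v))
        = ks.flatMap (fun v => (pvD l).filter (fun e => e.1 == v)) := by
      unfold List.flatMap
      exact congrArg List.flatten (List.map_congr_left hgrp)
    have hperm0 := pvPerm_groups ks P hnd hkmem
    rw [hflatg] at hperm0
    have hpermmap := hperm0.map (·.2)
    exact (hpermmap.foldl_eq' (fun a _ b _ z => pvComb_right_comm z a b) (0, 0)).symm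
  rw [hLHS, hAfilter]

-- ----- B-side: the bucket list under one more element -----
theorem pvD_append (l : List Int) (x : Int) :
    pvD (l ++ [x]) = pvD l ++ [(x, pvExt (pvD l) x)] := pvDps_append [] l x

theorem pvBucket_append_ne (l : List Int) (x v : Int) (hvx : v ≠ x) :
    pvBucket (pvD (l ++ [x])) v = pvBucket (pvD l) v := by
  unfold pvBucket
  rw [pvD_append, List.filter_append]
  have hb : (((x, pvExt (pvD l) x) : Int × (Int × Int)).1 == v) = false := by
    simp [Ne.symm hvx]
  simp [hb]

theorem pvBucket_append_self (l : List Int) (x : Int) :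
    pvBucket (pvD (l ++ [x])) x = pvComb (pvBucket (pvD l) x) (pvExt (pvD l) x) := by
  unfold pvBucket
  rw [pvD_append, List.filter_append]
  simp [List.foldl_append]

-- ----- B-side: the rank dictionary -----
theorem pvRank_not_mem (vs : List Int) (x : Int) (hx : x ∉ vs) (s : Int)
    (d : PySem.Dict Int Int) :
    ((PySem.List.enumerate vs s).foldl (fun d p => d.insert p.2 p.1) d).getD x 0
      = d.getD x 0 := by
  induction vs generalizing s d with
  | nil => simp [PySem.List.enumerate_nil]
  | cons a t ih =>
      rw [PySem.List.enumerate_cons, List.foldl_cons]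
      rw [ih (fun (h : x ∈ t) => hx (List.mem_cons_of_mem a h)) (s + 1) _]
      exact PySem.Dict.getD_insert_of_ne d s 0 (fun (h : x = a) => hx (by simp [h]))

theorem pvRank_getD (vs : List Int) (hnd : vs.Nodup) (i : Nat) (hi : i < vs.length)
    (s : Int) (d : PySem.Dict Int Int) :
    ((PySem.List.enumerate vs s).foldl (fun d p => d.insert p.2 p.1) d).getD (vs[i]'hi) 0
      = s + i := by
  induction vs generalizing s d i with
  | nil => simp at hi
  | cons a t ih =>
      rw [PySem.List.enumerate_cons, List.foldl_cons]
      cases i with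
      | zero =>
          have hx : a ∉ t := (List.nodup_cons.1 hnd).1
          simp only [List.getElem_cons_zero]
          rw [pvRank_not_mem t a hx (s + 1) _, PySem.Dict.getD_insert_self]
          simp
      | succ i =>
          have hi' : i < t.length := by simpa using hi
          simp only [List.getElem_cons_succ]
          rw [ih (List.nodup_cons.1 hnd).2 i hi' (s + 1) _]
          push_cast
          ring

-- ----- B-side: the main loop invariant -----
theorem pvBLoop (vals : List Int) (hpw : vals.Pairwise (· < ·)) (hne : vals ≠ [])
    (rank : PySem.Dict Int Int)
    (hrank : ∀ (i : Nat) (hi : i < vals.length), rank.getD (vals[i]'hi) 0 = (i : Int)) :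
    ∀ l, (∀ y ∈ l, y ∈ vals) →
      pvMod (l.foldl (pvBStep rank) (pvBuild vals.length, (0, 0))).1
          (vals.map (pvBucket (pvD l)))
        ∧ (l.foldl (pvBStep rank) (pvBuild vals.length, (0, 0))).2 = pvTop (pvQ l) := by
  have hnodup : vals.Nodup := hpw.imp (fun h => ne_of_lt h)
  intro l
  induction l using List.reverseRecOn with
  | nil =>
      intro _
      constructor
      · have hmap : vals.map (pvBucket (pvD [])) = List.replicate vals.length ((0, 0) : Int × Int) := by
          rw [show pvBucket (pvD []) = fun _ => ((0, 0) : Int × Int) from funext fun v => rfl]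
          exact List.map_const'
        rw [hmap]
        exact pvBuild_mod vals.length (List.length_pos_iff.2 hne)
      · rfl
  | append_singleton l x ih =>
      intro hmem
      have hmem' : ∀ y ∈ l, y ∈ vals := fun y hy => hmem y (by simp [hy])
      obtain ⟨hMod, hTop⟩ := ih hmem'
      rw [List.foldl_append, List.foldl_cons, List.foldl_nil]
      set s := l.foldl (pvBStep rank) (pvBuild vals.length, (0, 0)) with hs
      obtain ⟨i, hi, hxi⟩ := List.mem_iff_getElem.1 (hmem x (by simp))
      have hok : ∀ q ∈ vals.map (pvBucket (pvD l)), pvOk q := by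
        intro q hq
        rcases List.mem_map.1 hq with ⟨v, _, rfl⟩
        refine pvFold_ok _ _ (Or.inl rfl) ?_
        intro e he
        rcases List.mem_map.1 he with ⟨e', he', rfl⟩
        exact Or.inr (pvD_ge_one l e' (List.mem_of_mem_filter he'))
      -- the rank of x
      have hr : rank.getD x 0 = (i : Int) := by rw [← hxi]; exact hrank i hi
      -- the queried prefix state
      have hq : pvQuery s.1 (rank.getD x 0)
          = ((vals.take i).map (pvBucket (pvD l))).foldl pvComb (0, 0) := by
        rw [hr, pvQuery_eq s.1 _ hok hMod i, ← List.map_take]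
      -- ks = vals.take i qualifies for pvCur_eq
      have hksnd : (vals.take i).Nodup := (List.take_sublist i vals).nodup hnodup
      have hkslt : ∀ v ∈ vals.take i, v < x := by
        intro v hv
        obtain ⟨j, hj, hvj⟩ := List.mem_iff_getElem.1 hv
        have hj' : j < i := by
          have := hj
          rw [List.length_take] at this
          omega
        have hlt := List.pairwise_iff_getElem.1 hpw j i (by omega) hi hj'
        rw [← hxi, ← hvj, List.getElem_take]
        exact hlt
      have hkscov : ∀ y ∈ l, y < x → y ∈ vals.take i := by
        intro y hy hyx
        obtain ⟨j, hj, hyj⟩ := List.mem_iff_getElem.1 (hmem' y hy)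
        have hji : j < i := by
          by_contra hcon
          push_neg at hcon
          rcases Nat.lt_or_ge i j with hij | hij
          · have := List.pairwise_iff_getElem.1 hpw i j hi hj hij
            rw [hxi, hyj] at this
            omega
          · have : j = i := by omega
            subst this
            rw [hxi] at hyj
            omega
        have hjt : j < (vals.take i).length := by
          rw [List.length_take]; omega
        have : (vals.take i)[j]'hjt = y := by
          rw [List.getElem_take]; exact hyj
        exact this ▸ List.getElem_mem hjt
      -- the freshly computed state is the dp state of x
      have hcur : ((pvQuery s.1 (rank.getD x 0)).1 + 1, (pvQuery s.1 (rank.getD x 0)).2 + x)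
          = pvExt (pvD l) x := by
        rw [hq]
        exact pvCur_eq l x (vals.take i) hksnd hkslt hkscov
      have hcur1 : 1 ≤ (pvExt (pvD l) x).1 := pvExt_fst_ge_one (pvD l) x
      rw [hr] at hcur
      constructor
      · -- the updated tree models the new bucket list
        show pvMod (pvUpdate s.1 (rank.getD x 0) _) _
        rw [hr, hcur]
        have hilen : i < (vals.map (pvBucket (pvD l))).length := by
          rw [List.length_map]; exact hi
        have hupd := pvUpdate_mod s.1 (vals.map (pvBucket (pvD l))) (pvExt (pvD l) x) hcur1
          hok hMod i hilen
        have hset : (vals.map (pvBucket (pvD l))).set i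
              (pvComb ((vals.map (pvBucket (pvD l)))[i]'hilen) (pvExt (pvD l) x))
            = vals.map (pvBucket (pvD (l ++ [x]))) := by
          apply List.ext_getElem
          · simp
          · intro j hj1 hj2
            rw [List.getElem_set]
            by_cases hji : i = j
            · subst hji
              rw [if_pos rfl]
              simp only [List.getElem_map, hxi]
              exact (pvBucket_append_self l x).symm
            · rw [if_neg hji]
              simp only [List.getElem_map]
              have hne2 : vals[j]'(by simpa using hj2) ≠ x := by
                intro hcon
                exact hji (hnodup.getElem_inj_iff.1 (hxi.trans hcon.symm))
              rw [pvBucket_append_ne l x _ hne2]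
        rw [hset] at hupd
        exact hupd
      · -- the running top
        show pvComb s.2 _ = _
        rw [hTop, hr, hcur]
        have htopq : pvQ (l ++ [x]) = pvQ l ++ [pvExt (pvD l) x] := by
          unfold pvQ
          rw [pvD_append, List.map_append]
          rfl
        rw [htopq]
        unfold pvTop
        rw [List.foldl_append]
        rfl

theorem pvB_eq (arr : List Int) (h : arr ≠ []) :
    nonLisMaxSum_alt arr = arr.sum - (pvTop (pvQ arr)).2 := by
  obtain ⟨a, t, rfl⟩ : ∃ a t, arr = a :: t := by
    cases arr with
    | nil => exact absurd rfl h
    | cons a t => exact ⟨a, t, rfl⟩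
  set arr := a :: t with harr
  set vals := PySem.List.sorted (PySem.Set.ofList arr) (fun v => v) false with hvals
  have hpw : vals.Pairwise (· < ·) := PySem.List.sorted_ofList_pairwise_lt arr
  have hmem : ∀ y ∈ arr, y ∈ vals := by
    intro y hy
    rw [hvals, PySem.List.mem_sorted, PySem.Set.mem_ofList]
    exact hy
  have hne : vals ≠ [] := List.ne_nil_of_mem (hmem a (by simp [harr]))
  set rank : PySem.Dict Int Int :=
    (PySem.List.enumerate vals 0).foldl (fun d p => d.insert p.2 p.1) PySem.Dict.empty
    with hrankdef
  have hrank : ∀ (i : Nat) (hi : i < vals.length), rank.getD (vals[i]'hi) 0 = (i : Int) := by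
    intro i hi
    rw [hrankdef]
    have := pvRank_getD vals (hpw.imp (fun h => ne_of_lt h)) i hi 0 PySem.Dict.empty
    simpa using this
  have hloop := (pvBLoop vals hpw hne rank hrank arr (fun y hy => hmem y hy)).2
  show arr.sum - (arr.foldl (pvBStep rank) (pvBuild vals.length, (0, 0))).2.2 = _
  rw [hloop]

-- ===== VERDICT (by name: the statement is the Claim_ definition above) =====
theorem nonLisMaxSum_spec : Claim_equal_nonLisMaxSum := by
  intro arr _ hpre
  unfold Spec_nonLisMaxSum
  rw [pvA_eq arr hpre, pvB_eq arr hpre]
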